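-- pv_equiv track=rewrite | github.com/junhonglim49791/nutriq-shopee-product-quantity | order.py | which_filename_is_correct
-- ===== SOURCE A (Python) =====
-- def which_filename_is_correct(
--     all_files_order_completed_folder, required_order_completed_files
-- ):
--
--     required_file_exists = {file: False for file in required_order_completed_files}
--
--     for uploaded in all_files_order_completed_folder:
--         if uploaded in required_order_completed_files:
--             required_file_exists[uploaded] = True
--
--     return sorted(list(required_file_exists.items()))
-- ===== SOURCE B (Python) =====
-- def which_filename_is_correct(
--     all_files_order_completed_folder, required_order_completed_files
-- ):
--     # Single pass over the required files: each required file (deduplicated,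
--     # first occurrence kept) is tested for membership in the uploaded folder.
--     return sorted(
--         {
--             f: (f in all_files_order_completed_folder)
--             for f in required_order_completed_files
--         }.items()
--     )
-- ===== Notes on version B (the rewrite author's own statement) =====
-- stated objective: simpler
-- what changed: Replaces the init-then-mark pattern (build a dict of required->False, then iterate the uploaded folder toggling entries) by a single comprehension over the required files testing each for membership in the uploaded list; the uploaded folder is no longer the driving loop and no mutable dict state is maintained.
import Mathlib
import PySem

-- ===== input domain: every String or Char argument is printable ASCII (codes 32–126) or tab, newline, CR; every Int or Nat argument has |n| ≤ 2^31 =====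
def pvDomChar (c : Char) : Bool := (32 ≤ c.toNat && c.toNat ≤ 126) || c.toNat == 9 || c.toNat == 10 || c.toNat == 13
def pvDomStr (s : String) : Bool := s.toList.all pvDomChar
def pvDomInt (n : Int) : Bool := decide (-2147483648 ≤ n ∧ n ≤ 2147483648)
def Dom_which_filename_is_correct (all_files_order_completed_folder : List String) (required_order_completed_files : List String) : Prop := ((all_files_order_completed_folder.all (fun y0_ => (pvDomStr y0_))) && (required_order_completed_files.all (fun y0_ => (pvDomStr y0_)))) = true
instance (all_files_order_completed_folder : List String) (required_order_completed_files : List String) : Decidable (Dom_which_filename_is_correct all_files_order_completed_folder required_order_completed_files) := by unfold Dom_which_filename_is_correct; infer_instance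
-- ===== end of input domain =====

-- ===== PORT A =====
-- B changes the decomposition: one membership-test pass over the required files instead of init-then-mark.
-- Python sorts the (key, value) pairs by tuple order; the dict keys are pairwise distinct, so this equals a
-- stable sort by the key component, which is how both ports sort.
def which_filename_is_correct (all_files_order_completed_folder : List String) (required_order_completed_files : List String) : List (String × Bool) :=
  let required_file_exists : PySem.Dict String Bool :=
    required_order_completed_files.foldl (fun d file => d.insert file false) PySem.Dict.empty
  let required_file_exists :=
    all_files_order_completed_folder.foldl
      (fun d uploaded =>
        if uploaded ∈ required_order_completed_files then d.insert uploaded true else d)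
      required_file_exists
  PySem.List.sorted required_file_exists.items (fun p => p.1) false

-- ===== PORT B =====
-- the dict comprehension keyed by the required files = first-occurrence dedup (PySem.List.dedup) of the keys,
-- each mapped to its membership test
def which_filename_is_correct_alt (all_files_order_completed_folder : List String) (required_order_completed_files : List String) : List (String × Bool) :=
  PySem.List.sorted
    ((PySem.List.dedup required_order_completed_files).map
      (fun f => (f, decide (f ∈ all_files_order_completed_folder))))
    (fun p => p.1) false

-- ===== PRECONDITION & SPEC =====
def Spec_which_filename_is_correct (all_files_order_completed_folder : List String) (required_order_completed_files : List String) (out : List (String × Bool)) : Prop := out = which_filename_is_correct_alt all_files_order_completed_folder required_order_completed_files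
instance (all_files_order_completed_folder : List String) (required_order_completed_files : List String) (out : List (String × Bool)) : Decidable (Spec_which_filename_is_correct all_files_order_completed_folder required_order_completed_files out) := by unfold Spec_which_filename_is_correct; infer_instance

-- ===== CLAIM (what is proved, stated in full; the proofs are below) =====
def Claim_equal_which_filename_is_correct : Prop := ∀ (all_files_order_completed_folder : List String) (required_order_completed_files : List String), Dom_which_filename_is_correct all_files_order_completed_folder required_order_completed_files → Spec_which_filename_is_correct all_files_order_completed_folder required_order_completed_files (which_filename_is_correct all_files_order_completed_folder required_order_completed_files)

-- ===== LEMMAS AND PROOFS =====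

-- the init loop: all inserted values are `false`, so every lookup with default `false` is `false`
theorem pv_init_getD (req : List String) (d : PySem.Dict String Bool)
    (h : ∀ k, d.getD k false = false) (k : String) :
    (req.foldl (fun d file => d.insert file false) d).getD k false = false := by
  induction req generalizing d with
  | nil => exact h k
  | cons f t ih =>
      simp only [List.foldl_cons]
      exact ih _ (fun k' => by rw [PySem.Dict.getD_insert]; split <;> [rfl; exact h k'])

-- the init loop: keys are the deduplicated required files
theorem pv_init_keys (req : List String) :
    (req.foldl (fun d file => d.insert file false) (PySem.Dict.empty : PySem.Dict String Bool)).keys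
      = PySem.List.dedup req := by
  rw [PySem.Dict.keys_foldl_insert]
  simp [PySem.Dict.keys_empty, PySem.List.dedup_eq_ofList]
  rfl

-- the marking loop never adds keys (everything it inserts is already a key)
theorem pv_mark_keys (req all : List String) (d : PySem.Dict String Bool)
    (h : d.keys = PySem.List.dedup req) :
    ((all.foldl (fun d u => if u ∈ req then d.insert u true else d) d)).keys
      = PySem.List.dedup req := by
  induction all generalizing d with
  | nil => exact h
  | cons u t ih =>
      simp only [List.foldl_cons]
      by_cases hu : u ∈ req
      · rw [if_pos hu]
        refine ih _ ?_
        rw [PySem.Dict.keys_insert_of_contains, h]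
        rw [PySem.Dict.contains_iff_mem_keys, h]
        exact (PySem.List.mem_dedup req u).mpr hu
      · rw [if_neg hu]; exact ih _ h

-- the marking loop: final value of key k with default false
theorem pv_mark_getD (req all : List String) (d : PySem.Dict String Bool) (k : String) :
    ((all.foldl (fun d u => if u ∈ req then d.insert u true else d) d)).getD k false
      = if k ∈ all ∧ k ∈ req then true else d.getD k false := by
  induction all generalizing d with
  | nil => simp
  | cons u t ih =>
      simp only [List.foldl_cons]
      rw [ih]
      by_cases hk : k ∈ t ∧ k ∈ req
      · rw [if_pos hk, if_pos ⟨List.mem_cons_of_mem u hk.1, hk.2⟩]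
      · rw [if_neg hk]
        by_cases hkr : k ∈ req
        · by_cases hku : k = u
          · subst hku
            rw [if_pos hkr, if_pos (show k ∈ k :: t ∧ k ∈ req from ⟨List.mem_cons_self, hkr⟩),
              PySem.Dict.getD_insert, if_pos rfl]
          · have hmem : ¬ (k ∈ u :: t ∧ k ∈ req) := by
              rintro ⟨hm, -⟩
              rcases List.mem_cons.mp hm with e | hm
              · exact hku e
              · exact hk ⟨hm, hkr⟩
            rw [if_neg hmem]
            by_cases hu : u ∈ req
            · rw [if_pos hu, PySem.Dict.getD_insert, if_neg hku]
            · rw [if_neg hu]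
        · have hmem : ¬ (k ∈ u :: t ∧ k ∈ req) := fun h => hkr h.2
          rw [if_neg hmem]
          by_cases hu : u ∈ req
          · rw [if_pos hu, PySem.Dict.getD_insert,
              if_neg (fun e => hkr (by rw [e]; exact hu))]
          · rw [if_neg hu]

theorem which_filename_is_correct_spec : Claim_equal_which_filename_is_correct := by
  intro all req _
  unfold Spec_which_filename_is_correct which_filename_is_correct which_filename_is_correct_alt
  simp only []
  set d0 := req.foldl (fun d file => d.insert file false) (PySem.Dict.empty : PySem.Dict String Bool) with hd0
  set d1 := all.foldl (fun d u => if u ∈ req then d.insert u true else d) d0 with hd1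
  have hkeys : d1.keys = PySem.List.dedup req := pv_mark_keys req all d0 (pv_init_keys req)
  have hnodup : d1.keys.Nodup := hkeys ▸ PySem.List.nodup_dedup req
  have hitems : d1.items = (PySem.List.dedup req).map (fun f => (f, decide (f ∈ all))) := by
    rw [PySem.Dict.items_eq_map_keys d1 hnodup false, hkeys]
    refine List.map_congr_left (fun k hk => ?_)
    have hkr : k ∈ req := (PySem.List.mem_dedup req k).mp hk
    rw [hd1, pv_mark_getD req all d0 k,
      pv_init_getD req _ (fun k' => PySem.Dict.getD_empty ..) k]
    by_cases hka : k ∈ all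
    · rw [if_pos ⟨hka, hkr⟩]; simp [hka]
    · rw [if_neg (fun h => hka h.1)]; simp [hka]
  rw [hitems]
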